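-- pv_equiv track=rewrite | github.com/Vishal1889/ci-analyzer-tool | src/analysers/iflw_channel_extractor.py | _resolve_one_pass
-- ===== SOURCE A (Python) =====
-- from typing import Dict, Any, List, Tuple, Optional
--
-- def _resolve_one_pass(input_str: str, config: Dict[str, str]) -> str:
--     """
--     Replace {{key}} placeholders with values from config dictionary
--
--     Args:
--         input_str: String potentially containing {{key}} placeholders
--         config: Configuration dictionary
--
--     Returns:
--         String with placeholders replaced (or kept if no value found)
--     """
--     if not input_str or '{{' not in input_str:
--         return input_str
--
--     result = []
--     i = 0
--
--     while i < len(input_str):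
--         start = input_str.find('{{', i)
--
--         if start < 0:
--             # No more placeholders
--             result.append(input_str[i:])
--             break
--
--         # Append text before placeholder
--         result.append(input_str[i:start])
--
--         # Find end of placeholder
--         end = input_str.find('}}', start + 2)
--
--         if end < 0:
--             # Malformed placeholder, keep rest as-is
--             result.append(input_str[start:])
--             break
--
--         # Extract key and lookup value
--         key = input_str[start + 2:end]
--         value = config.get(key)
--
--         if value:
--             result.append(value)
--         else:
--             # Keep placeholder if no value found
--             result.append(input_str[start:end + 2])
--
--         i = end + 2
--
--     return ''.join(result)
-- ===== SOURCE B (Python) =====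
-- import re
--
-- _PLACEHOLDER = re.compile(r'\{\{(.*?)\}\}', re.DOTALL)
--
--
-- def _resolve_one_pass(input_str, config):
--     """Replace {{key}} placeholders with values from config (regex-driven)."""
--     if not input_str or '{{' not in input_str:
--         return input_str
--
--     def repl(m):
--         value = config.get(m.group(1))
--         return value if value else m.group(0)
--
--     return _PLACEHOLDER.sub(repl, input_str)
-- ===== Notes on version B (the rewrite author's own statement) =====
-- stated objective: idiomatic
-- what changed: Replaced the explicit find-based two-pointer loop that builds a list of fragments with a single re.sub over the non-greedy pattern \{\{(.*?)\}\} (DOTALL) whose replacement function looks the key up and keeps the placeholder when the value is falsy.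
import Mathlib
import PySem

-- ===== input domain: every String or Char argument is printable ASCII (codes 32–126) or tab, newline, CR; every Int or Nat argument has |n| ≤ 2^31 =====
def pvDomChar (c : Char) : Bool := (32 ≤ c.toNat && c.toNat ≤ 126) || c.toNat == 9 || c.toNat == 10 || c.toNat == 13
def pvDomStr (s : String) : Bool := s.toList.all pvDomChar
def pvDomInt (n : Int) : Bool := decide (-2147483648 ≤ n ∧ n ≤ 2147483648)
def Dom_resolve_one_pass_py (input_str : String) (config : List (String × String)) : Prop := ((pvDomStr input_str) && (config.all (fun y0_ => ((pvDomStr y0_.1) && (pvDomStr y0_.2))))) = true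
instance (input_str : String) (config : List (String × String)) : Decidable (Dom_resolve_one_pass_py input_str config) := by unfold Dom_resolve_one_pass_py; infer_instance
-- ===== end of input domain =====

-- B replaces A's explicit find-based two-pointer loop with a single pattern-driven
-- left-to-right substitution pass (Python: one re.sub with a non-greedy placeholder
-- pattern); objective: idiomatic. Return values agree on all inputs.

-- ===== PORT A =====
-- config.get(key): first-match lookup on the association list (the dict convention)
def cfgGet (config : List (String × String)) (k : String) : Option String :=
  (config.find? (fun p => p.1 == k)).map (fun p => p.2)

-- facts about a successful 2-character findFrom, used for loopA's termination
lemma ff_facts (s sub : List Char) (h2 : sub.length = 2) (k : Nat) (hk : k ≤ s.length)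
    (h : 0 ≤ PySem.Chars.findFrom s sub (k : Int)) :
    k ≤ (PySem.Chars.findFrom s sub (k : Int)).toNat ∧
    sub <+: s.drop (PySem.Chars.findFrom s sub (k : Int)).toNat ∧
    (PySem.Chars.findFrom s sub (k : Int)).toNat + 2 ≤ s.length ∧
    ∀ j : Nat, k ≤ j → j < (PySem.Chars.findFrom s sub (k : Int)).toNat → ¬ sub <+: s.drop j := by
  have hne : PySem.Chars.findFrom s sub (k : Int) ≠ -1 := by omega
  obtain ⟨h1, hpre, hmin⟩ := PySem.Chars.findFrom_natCast_spec s sub k hk hne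
  refine ⟨by omega, hpre, ?_, hmin⟩
  have hl := hpre.length_le
  simp only [List.length_drop, h2] at hl
  omega

-- the while-loop of A: `result` is the accumulated fragment list, `i` the scan position
def loopA (config : List (String × String)) (s : List Char)
    (result : List (List Char)) (i : Nat) : List (List Char) :=
  if hi : i < s.length then
    let start := PySem.Chars.findFrom s ['{', '{'] (i : Int)
    if hs : start < 0 then
      result ++ [PySem.List.slice s (some (i : Int)) none]
    else
      let result1 := result ++ [PySem.List.slice s (some (i : Int)) (some start)]
      let e := PySem.Chars.findFrom s ['}', '}'] (start + 2)
      if he : e < 0 then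
        result1 ++ [PySem.List.slice s (some start) none]
      else
        let key := PySem.List.slice s (some (start + 2)) (some e)
        let value := cfgGet config (String.mk key)
        let piece :=
          match value with
          | some v => if v ≠ "" then v.toList else PySem.List.slice s (some start) (some (e + 2))
          | none => PySem.List.slice s (some start) (some (e + 2))
        loopA config s (result1 ++ [piece]) (e.toNat + 2)
  else
    result
termination_by s.length - i
decreasing_by
  obtain ⟨hk1, -, hl1, -⟩ := ff_facts s ['{','{'] rfl i (by omega) (by omega)
  have hcast : ((PySem.Chars.findFrom s ['{','{'] (i : Int)) + 2 : Int)
      = (((PySem.Chars.findFrom s ['{','{'] (i : Int)).toNat + 2 : Nat) : Int) := by omega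
  have he2 : ¬ PySem.Chars.findFrom s ['}','}']
      ((((PySem.Chars.findFrom s ['{','{'] (i : Int)).toNat + 2 : Nat) : Int)) < 0 := by
    rw [← hcast]; exact he
  obtain ⟨hk2, -, hl2, -⟩ := ff_facts s ['}','}'] rfl
      ((PySem.Chars.findFrom s ['{','{'] (i : Int)).toNat + 2) hl1 (by omega)
  rw [hcast]
  omega

def resolve_one_pass_py (input_str : String) (config : List (String × String)) : String :=
  if input_str = "" ∨ PySem.Str.isIn "{{" input_str = false then input_str
  else String.mk (PySem.Chars.join [] (loopA config input_str.toList [] 0))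

-- ===== PORT B =====
-- Hand port of the fixed regex r'\{\{(.*?)\}\}' (DOTALL): at a '{{' the lazy group is
-- closed by the FIRST following '}}'; findClose performs exactly that lazy search.
def findClose : List Char → Option (List Char × List Char)
  | [] => none
  | [_] => none
  | c :: d :: rest =>
    if c = '}' ∧ d = '}' then some ([], rest)
    else (findClose (d :: rest)).map (fun p => (c :: p.1, p.2))

lemma findClose_length : ∀ (cs k r : List Char), findClose cs = some (k, r) → r.length + 2 ≤ cs.length := by
  intro cs
  induction cs with
  | nil => intro k r h; simp [findClose] at h
  | cons c t ih =>
    cases t with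
    | nil => intro k r h; simp [findClose] at h
    | cons d u =>
      intro k r h
      rw [findClose] at h
      split at h
      · injection h with h'
        injection h' with h1 h2
        subst h2
        simp
      · cases hfc : findClose (d :: u) with
        | none => rw [hfc] at h; simp at h
        | some p =>
          rw [hfc] at h
          simp only [Option.map_some] at h
          injection h with h'
          have hr : r = p.2 := by
            have := congrArg Prod.snd h'
            simpa using this.symm
          subst hr
          have := ih p.1 p.2 (by rw [hfc])
          simpa using Nat.le_succ_of_le this

-- the replacement for one matched placeholder with group `key` (value if truthy, else group(0))
def pieceB (config : List (String × String)) (key : List Char) : List Char :=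
  match cfgGet config (String.mk key) with
  | some v => if v ≠ "" then v.toList else '{' :: '{' :: (key ++ ['}', '}'])
  | none => '{' :: '{' :: (key ++ ['}', '}'])

-- the re.sub scan: try a match at each position, lazy close, emit replacement, continue after it
def subst (config : List (String × String)) : List Char → List Char
  | [] => []
  | [c] => [c]
  | c :: d :: rest =>
    if c = '{' ∧ d = '{' then
      match hfc : findClose rest with
      | none => c :: d :: rest
      | some (key, rest') => pieceB config key ++ subst config rest'
    else c :: subst config (d :: rest)
termination_by cs => cs.length
decreasing_by
  · have := findClose_length rest key rest' hfc; simp; omega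
  · simp

def resolve_one_pass_py_alt (input_str : String) (config : List (String × String)) : String :=
  if input_str = "" ∨ PySem.Str.isIn "{{" input_str = false then input_str
  else String.mk (subst config input_str.toList)

-- ===== PRECONDITION & SPEC =====
def Spec_resolve_one_pass_py (input_str : String) (config : List (String × String)) (out : String) : Prop := out = resolve_one_pass_py_alt input_str config
instance (input_str : String) (config : List (String × String)) (out : String) : Decidable (Spec_resolve_one_pass_py input_str config out) := by unfold Spec_resolve_one_pass_py; infer_instance

-- ===== CLAIM (what is proved, stated in full; the proofs are below) =====
def Claim_equal_resolve_one_pass_py : Prop := ∀ (input_str : String) (config : List (String × String)), Dom_resolve_one_pass_py input_str config → Spec_resolve_one_pass_py input_str config (resolve_one_pass_py input_str config)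

-- ===== LEMMAS AND PROOFS =====

lemma joinNil (L : List (List Char)) : PySem.Chars.join [] L = L.flatten := by
  induction L with
  | nil => simp [PySem.Chars.join_nil]
  | cons p t ih =>
    cases t with
    | nil => simp [PySem.Chars.join_singleton]
    | cons q r => rw [PySem.Chars.join_cons_cons]; simp_all

lemma pair_prefix_iff (a b c d : Char) (t : List Char) : [a, b] <+: c :: d :: t ↔ a = c ∧ b = d := by
  constructor
  · intro h
    obtain ⟨r, hr⟩ := h
    simp only [List.cons_append, List.nil_append, List.cons.injEq] at hr
    exact ⟨hr.1, hr.2.1⟩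
  · rintro ⟨rfl, rfl⟩
    exact ⟨t, rfl⟩

lemma drop_eq_of_prefix2 (s : List Char) (n : Nat) (a b : Char) (h : [a, b] <+: s.drop n) :
    s.drop n = a :: b :: s.drop (n + 2) := by
  obtain ⟨t, ht⟩ := h
  have hd : List.drop 2 (List.drop n s) = List.drop (n + 2) s := by
    rw [List.drop_drop]
  rw [← hd, ← ht]
  rfl

lemma findClose_none_iff : ∀ cs : List Char, findClose cs = none ↔ ¬ ['}', '}'] <:+: cs := by
  intro cs
  induction cs with
  | nil =>
    simp only [findClose, true_iff]
    intro h
    have := h.length_le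
    simp at this
  | cons c t ih =>
    cases t with
    | nil =>
      simp only [findClose, true_iff]
      intro h
      have := h.length_le
      simp at this
    | cons d u =>
      rw [findClose]
      split
      · rename_i hcd
        obtain ⟨rfl, rfl⟩ := hcd
        have hinf : ['}', '}'] <:+: '}' :: '}' :: u := ⟨[], u, rfl⟩
        simp [hinf]
      · rename_i hcd
        rw [Option.map_eq_none_iff, ih]
        have hiff : (['}', '}'] <:+: c :: d :: u) ↔ (['}', '}'] <:+: d :: u) := by
          rw [List.infix_cons_iff]
          constructor
          · rintro (hp | hinf)
            · obtain ⟨h1, h2⟩ := (pair_prefix_iff _ _ _ _ _).mp hp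
              exact absurd ⟨h1.symm, h2.symm⟩ hcd
            · exact hinf
          · exact Or.inr
        rw [hiff]

lemma subst_skip (config : List (String × String)) :
    ∀ (m cs : List Char), (∀ j, j < m.length → ¬ ['{', '{'] <+: (m ++ cs).drop j) →
      subst config (m ++ cs) = m ++ subst config cs := by
  intro m
  induction m with
  | nil => intro cs _; simp
  | cons a m' ih =>
    intro cs h
    cases hmc : m' ++ cs with
    | nil =>
      obtain ⟨hm', hcs⟩ := List.append_eq_nil_iff.mp hmc
      subst hm'; subst hcs
      simp [subst]
    | cons b t =>
      have hshape : (a :: m') ++ cs = a :: b :: t := by simp [hmc]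
      have hnot : ¬ (a = '{' ∧ b = '{') := by
        have h0 := h 0 (by simp)
        rw [List.drop_zero, hshape, pair_prefix_iff] at h0
        exact fun hab => h0 ⟨hab.1.symm, hab.2.symm⟩
      rw [hshape, subst, if_neg hnot, ← hmc]
      have harg : ∀ j, j < m'.length → ¬ ['{', '{'] <+: (m' ++ cs).drop j := by
        intro j hj hpre
        have := h (j + 1) (by simp; omega)
        rw [List.cons_append, List.drop_succ_cons] at this
        exact this hpre
      rw [ih cs harg]
      simp

lemma subst_nil (config : List (String × String)) : subst config [] = [] := by
  simp [subst]

lemma subst_no_open (config : List (String × String)) (cs : List Char)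
    (h : ¬ ['{', '{'] <:+: cs) : subst config cs = cs := by
  have hcond : ∀ j, j < cs.length → ¬ ['{', '{'] <+: (cs ++ []).drop j := by
    intro j hj hpre
    rw [List.append_nil] at hpre
    exact h (List.infix_iff_prefix_suffix.mpr ⟨cs.drop j, hpre, List.drop_suffix j cs⟩)
  have := subst_skip config cs [] hcond
  rw [List.append_nil, subst_nil, List.append_nil] at this
  exact this

lemma findClose_first : ∀ (k r : List Char),
    (∀ j, j < k.length → ¬ ['}', '}'] <+: (k ++ '}' :: '}' :: r).drop j) →
    findClose (k ++ '}' :: '}' :: r) = some (k, r) := by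
  intro k
  induction k with
  | nil => intro r _; simp [findClose]
  | cons c k' ih =>
    intro r h
    cases hku : k' ++ '}' :: '}' :: r with
    | nil => simp at hku
    | cons d u =>
      have hshape : (c :: k') ++ '}' :: '}' :: r = c :: d :: u := by simp [hku]
      have hnot : ¬ (c = '}' ∧ d = '}') := by
        have h0 := h 0 (by simp)
        rw [List.drop_zero, hshape, pair_prefix_iff] at h0
        exact fun hab => h0 ⟨hab.1.symm, hab.2.symm⟩
      rw [hshape, findClose, if_neg hnot, ← hku]
      have harg : ∀ j, j < k'.length → ¬ ['}', '}'] <+: (k' ++ '}' :: '}' :: r).drop j := by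
        intro j hj hpre
        have := h (j + 1) (by simp; omega)
        rw [List.cons_append, List.drop_succ_cons] at this
        exact this hpre
      rw [ih r harg]
      rfl

-- the one-step evaluation of subst at a '{{'
lemma subst_open (config : List (String × String)) (rest : List Char) :
    subst config ('{' :: '{' :: rest) =
      (match findClose rest with
       | none => '{' :: '{' :: rest
       | some (key, rest') => pieceB config key ++ subst config rest') := by
  rw [subst]
  cases findClose rest with
  | none => simp
  | some p =>
    obtain ⟨k1, r1⟩ := p
    simp

lemma subst_skip_drop (config : List (String × String)) (s : List Char) (i n : Nat)
    (hin : i ≤ n) (hn : n ≤ s.length)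
    (hmin : ∀ j, i ≤ j → j < n → ¬ ['{', '{'] <+: s.drop j) :
    subst config (s.drop i) = (s.drop i).take (n - i) ++ subst config (s.drop n) := by
  have hdd : (s.drop i).drop (n - i) = s.drop n := by
    rw [List.drop_drop]; congr 1; omega
  have hdec : (s.drop i).take (n - i) ++ s.drop n = s.drop i := by
    conv_rhs => rw [← List.take_append_drop (n - i) (s.drop i)]
    rw [hdd]
  have hlen : ((s.drop i).take (n - i)).length = n - i := by
    simp only [List.length_take, List.length_drop]
    omega
  have hcond : ∀ j, j < ((s.drop i).take (n - i)).length →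
      ¬ ['{', '{'] <+: (((s.drop i).take (n - i)) ++ s.drop n).drop j := by
    intro j hj
    rw [hdec]
    have hdj : (s.drop i).drop j = s.drop (i + j) := by rw [List.drop_drop]
    rw [hdj]
    rw [hlen] at hj
    exact hmin (i + j) (by omega) (by omega)
  have hfin := subst_skip config ((s.drop i).take (n - i)) (s.drop n) hcond
  rw [hdec] at hfin
  exact hfin

lemma loopA_flatten (config : List (String × String)) (s : List Char)
    (result : List (List Char)) (i : Nat) :
    (loopA config s result i).flatten = result.flatten ++ subst config (s.drop i) := by
  fun_induction loopA config s result i with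
  | case1 result i hi start hs =>
    have hstart : start = PySem.Chars.findFrom s ['{', '{'] (i : Int) := rfl
    have heq : PySem.Chars.findFrom s ['{', '{'] (i : Int) = -1 := by
      rw [hstart] at hs
      by_contra hne
      obtain ⟨h1, -, -⟩ := PySem.Chars.findFrom_natCast_spec s ['{', '{'] i (by omega) hne
      omega
    have hninf := (PySem.Chars.findFrom_natCast_eq_neg_one_iff s ['{', '{'] i (by omega)).mp heq
    rw [subst_no_open config _ hninf, PySem.List.slice_from_natCast]
    simp
  | case2 result i hi start hs result1 e he =>
    have hstart : start = PySem.Chars.findFrom s ['{', '{'] (i : Int) := rfl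
    have hE0 : e = PySem.Chars.findFrom s ['}', '}'] (start + 2) := rfl
    have hres1 : result1 = result ++ [PySem.List.slice s (some (i : Int)) (some start)] := rfl
    have hs0 : 0 ≤ PySem.Chars.findFrom s ['{', '{'] (i : Int) := by rw [hstart] at hs; omega
    obtain ⟨hk1, hp1, hl1, hmin1⟩ := ff_facts s ['{', '{'] rfl i (by omega) hs0
    obtain ⟨st, hst⟩ : ∃ st : Nat, PySem.Chars.findFrom s ['{', '{'] (i : Int) = (st : Int) :=
      ⟨_, (Int.toNat_of_nonneg hs0).symm⟩
    rw [hst] at hk1 hp1 hl1 hmin1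
    simp only [Int.toNat_natCast] at hk1 hp1 hl1 hmin1
    have hcast2 : ((st : Int) + 2) = ((st + 2 : Nat) : Int) := by push_cast; ring
    have hStart : start = ((st : Nat) : Int) := by rw [hstart, hst]
    have heq2 : PySem.Chars.findFrom s ['}', '}'] ((st + 2 : Nat) : Int) = -1 := by
      rw [hE0, hStart, hcast2] at he
      by_contra hne
      obtain ⟨h1, -, -⟩ := PySem.Chars.findFrom_natCast_spec s ['}', '}'] (st + 2) hl1 hne
      omega
    have hninf2 := (PySem.Chars.findFrom_natCast_eq_neg_one_iff s ['}', '}'] (st + 2) hl1).mp heq2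
    have hopen1 : s.drop st = '{' :: '{' :: s.drop (st + 2) := drop_eq_of_prefix2 s st _ _ hp1
    have hsub1 : subst config (s.drop i) = (s.drop i).take (st - i) ++ subst config (s.drop st) :=
      subst_skip_drop config s i st hk1 (by omega) hmin1
    have hsub2 : subst config (s.drop st) = s.drop st := by
      conv_lhs => rw [hopen1]
      rw [subst_open, (findClose_none_iff _).mpr hninf2, ← hopen1]
    rw [hres1, hStart, PySem.List.slice_natCast, PySem.List.slice_from_natCast,
      hsub1, hsub2]
    simp [List.flatten_append]
  | case3 result i hi start hs result1 e he key value piece ih =>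
    have hstart : start = PySem.Chars.findFrom s ['{', '{'] (i : Int) := rfl
    have hE0 : e = PySem.Chars.findFrom s ['}', '}'] (start + 2) := rfl
    have hres1 : result1 = result ++ [PySem.List.slice s (some (i : Int)) (some start)] := rfl
    have hkey0 : key = PySem.List.slice s (some (start + 2)) (some e) := rfl
    have hpiece0 : piece = (match value with
      | some v => if v ≠ "" then v.toList else PySem.List.slice s (some start) (some (e + 2))
      | none => PySem.List.slice s (some start) (some (e + 2))) := rfl
    have hvalue : value = cfgGet config (String.mk key) := rfl
    have hs0 : 0 ≤ PySem.Chars.findFrom s ['{', '{'] (i : Int) := by rw [hstart] at hs; omega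
    obtain ⟨hk1, hp1, hl1, hmin1⟩ := ff_facts s ['{', '{'] rfl i (by omega) hs0
    obtain ⟨st, hst⟩ : ∃ st : Nat, PySem.Chars.findFrom s ['{', '{'] (i : Int) = (st : Int) :=
      ⟨_, (Int.toNat_of_nonneg hs0).symm⟩
    rw [hst] at hk1 hp1 hl1 hmin1
    simp only [Int.toNat_natCast] at hk1 hp1 hl1 hmin1
    have hcast2 : ((st : Int) + 2) = ((st + 2 : Nat) : Int) := by push_cast; ring
    have hStart : start = ((st : Nat) : Int) := by rw [hstart, hst]
    have he0 : 0 ≤ PySem.Chars.findFrom s ['}', '}'] ((st + 2 : Nat) : Int) := by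
      rw [hE0, hStart, hcast2] at he
      omega
    obtain ⟨hk2, hp2, hl2, hmin2⟩ := ff_facts s ['}', '}'] rfl (st + 2) hl1 he0
    obtain ⟨et, het⟩ : ∃ et : Nat, PySem.Chars.findFrom s ['}', '}'] ((st + 2 : Nat) : Int) = (et : Int) :=
      ⟨_, (Int.toNat_of_nonneg he0).symm⟩
    rw [het] at hk2 hp2 hl2 hmin2
    simp only [Int.toNat_natCast] at hk2 hp2 hl2 hmin2
    have hE : e = ((et : Nat) : Int) := by rw [hE0, hStart, hcast2, het]
    obtain ⟨K, hK⟩ : ∃ K, (s.drop (st + 2)).take (et - (st + 2)) = K := ⟨_, rfl⟩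
    have hKlen : K.length = et - (st + 2) := by
      rw [← hK]
      simp only [List.length_take, List.length_drop]
      omega
    have hkeyK : key = K := by
      rw [hkey0, hStart, hE, hcast2, PySem.List.slice_natCast, hK]
    have hopen1 : s.drop st = '{' :: '{' :: s.drop (st + 2) := drop_eq_of_prefix2 s st _ _ hp1
    have hopen2 : s.drop et = '}' :: '}' :: s.drop (et + 2) := drop_eq_of_prefix2 s et _ _ hp2
    have hdd : (s.drop (st + 2)).drop (et - (st + 2)) = s.drop et := by
      rw [List.drop_drop]; congr 1; omega
    have hclose : K ++ '}' :: '}' :: s.drop (et + 2) = s.drop (st + 2) := by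
      rw [← hK]
      conv_rhs => rw [← List.take_append_drop (et - (st + 2)) (s.drop (st + 2))]
      rw [hdd, hopen2]
    have hfc : findClose (s.drop (st + 2)) = some (K, s.drop (et + 2)) := by
      rw [← hclose]
      apply findClose_first
      intro j hj hpre
      rw [hclose] at hpre
      have hdj : (s.drop (st + 2)).drop j = s.drop (st + 2 + j) := by rw [List.drop_drop]
      rw [hdj] at hpre
      rw [hKlen] at hj
      exact hmin2 (st + 2 + j) (by omega) (by omega) hpre
    have hsub1 : subst config (s.drop i) = (s.drop i).take (st - i) ++ subst config (s.drop st) :=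
      subst_skip_drop config s i st hk1 (by omega) hmin1
    have hsub2 : subst config (s.drop st) = pieceB config K ++ subst config (s.drop (et + 2)) := by
      rw [hopen1, subst_open, hfc]
    have hslice2 : PySem.List.slice s (some start) (some (e + 2)) = '{' :: '{' :: (K ++ ['}', '}']) := by
      rw [hStart, hE]
      have h1 : ((et : Int) + 2) = ((et + 2 : Nat) : Int) := by push_cast; ring
      rw [h1, PySem.List.slice_natCast]
      have hm : et + 2 - st = (et - (st + 2) + 2) + 1 + 1 := by omega
      rw [hm, hopen1, List.take_succ_cons, List.take_succ_cons, ← hclose]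
      have h2 : et - (st + 2) + 2 = K.length + 2 := by omega
      rw [h2, List.take_length_add_append]
      rfl
    have hpiece : piece = pieceB config K := by
      rw [hpiece0, hvalue, hkeyK, hslice2]
      cases hcg : cfgGet config (String.mk K) <;> simp [pieceB, hcg]
    rw [ih, hres1, hpiece, hStart, hE]
    simp only [Int.toNat_natCast]
    rw [PySem.List.slice_natCast, hsub1, hsub2]
    simp [List.flatten_append]
  | case4 result i hi =>
    have hd : s.drop i = [] := List.drop_eq_nil_of_le (by omega)
    rw [hd, subst_nil]
    simp

-- ===== VERDICT (by name: the statement is the Claim_ definition above) =====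
theorem resolve_one_pass_py_spec : Claim_equal_resolve_one_pass_py := by
  intro input_str config _
  unfold Spec_resolve_one_pass_py resolve_one_pass_py resolve_one_pass_py_alt
  split
  · rfl
  · rw [joinNil, loopA_flatten]
    simp
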